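-- pv_equiv track=rewrite | github.com/drpacman/advent-of-code-2020 | day10/day10.py | get_items_in_runs
-- ===== SOURCE A (Python) =====
-- def get_items_in_runs(adapters):
--     curr = 0
--     items_in_run=1
--     runs = []
--     for adapter in adapters:
--         if adapter == curr + 1:
--             items_in_run = items_in_run + 1
--         else:
--             runs.append(items_in_run)
--             items_in_run = 1
--         curr = adapter
--     runs.append(items_in_run)
--     return runs
-- ===== SOURCE B (Python) =====
-- def get_items_in_runs(adapters):
--     # run lengths via break positions: a run boundary sits wherever s[i] != s[i-1] + 1
--     s = [0] + list(adapters)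
--     n = len(s)
--     bounds = [0] + [i for i in range(1, n) if s[i] != s[i - 1] + 1] + [n]
--     return [b - a for a, b in zip(bounds, bounds[1:])]
-- ===== Notes on version B (the rewrite author's own statement) =====
-- stated objective: alternative
-- what changed: Replaces A's curr/items_in_run state machine with a break-position computation: prepend a zero to the adapter list, collect the indices where the +1 chain restarts, and return adjacent differences of the boundary list.
import Mathlib
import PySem

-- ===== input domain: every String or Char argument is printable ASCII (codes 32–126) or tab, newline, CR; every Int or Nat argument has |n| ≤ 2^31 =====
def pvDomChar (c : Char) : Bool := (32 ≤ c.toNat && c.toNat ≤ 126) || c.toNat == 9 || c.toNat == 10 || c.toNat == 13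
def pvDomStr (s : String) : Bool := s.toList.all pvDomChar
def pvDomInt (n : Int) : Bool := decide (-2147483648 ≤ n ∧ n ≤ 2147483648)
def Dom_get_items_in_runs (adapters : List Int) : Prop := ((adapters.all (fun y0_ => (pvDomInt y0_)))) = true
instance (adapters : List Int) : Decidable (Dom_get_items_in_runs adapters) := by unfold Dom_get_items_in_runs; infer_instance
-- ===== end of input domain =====

-- B computes the run lengths as differences of break positions (indices where the +1 chain
-- restarts) instead of A's explicit curr/items_in_run state machine; objective: alternative.


-- ===== PORT A =====
def get_items_in_runs (adapters : List Int) : List Int :=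
  let st := adapters.foldl
    (fun (st : Int × Int × List Int) adapter =>
      if adapter = st.1 + 1 then (adapter, st.2.1 + 1, st.2.2)
      else (adapter, 1, st.2.2 ++ [st.2.1]))
    (0, 1, ([] : List Int))
  st.2.2 ++ [st.2.1]

-- ===== PORT B =====
-- transliteration of Source B; s[i] for the always-in-range indices i, i-1 is PySem.List.pyGetD
def get_items_in_runs_alt (adapters : List Int) : List Int :=
  let s : List Int := 0 :: adapters
  let n : Int := (s.length : Int)
  let bounds : List Int :=
    [0] ++ (PySem.List.pyRange 1 n 1).filter
      (fun i => !(PySem.List.pyGetD s i 0 == PySem.List.pyGetD s (i - 1) 0 + 1)) ++ [n]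
  (bounds.zip (PySem.List.slice bounds (some 1) none)).map (fun p => p.2 - p.1)

-- ===== PRECONDITION & SPEC =====
def Spec_get_items_in_runs (adapters : List Int) (out : List Int) : Prop := out = get_items_in_runs_alt adapters
instance (adapters : List Int) (out : List Int) : Decidable (Spec_get_items_in_runs adapters out) := by unfold Spec_get_items_in_runs; infer_instance

-- ===== CLAIM (what is proved, stated in full; the proofs are below) =====
def Claim_equal_get_items_in_runs : Prop := ∀ (adapters : List Int), Dom_get_items_in_runs adapters → Spec_get_items_in_runs adapters (get_items_in_runs adapters)

-- ===== LEMMAS AND PROOFS =====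

-- reference recursion for A's state machine and break positions of the chain, used only in proofs
def brkI (c : Int) (l : List Int) (j : Int) : List Int :=
  match l with
  | [] => []
  | a :: t => (if a = c + 1 then [] else [j]) ++ brkI a t (j + 1)

theorem N2 (l : List Int) : ∀ (c : Int) (a : Nat),
    ((List.range l.length).filter
        (fun t => !((c :: l).getD (t+1) 0 == (c :: l).getD t 0 + 1))).map
      (fun t => ((t + (a+1) : Nat) : Int)) = brkI c l ((a : Int) + 1) := by
  induction l with
  | nil => intro c a; simp [brkI]
  | cons x t ih =>
    intro c a
    have hpred : ∀ k : Nat,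
        (fun t0 => !((c :: x :: t).getD (t0+1) 0 == (c :: x :: t).getD t0 0 + 1)) (k+1)
          = (fun t0 => !((x :: t).getD (t0+1) 0 == (x :: t).getD t0 0 + 1)) k := by
      intro k; simp
    have hfc : List.filter
        ((fun t0 => !((c :: x :: t).getD (t0+1) 0 == (c :: x :: t).getD t0 0 + 1)) ∘ Nat.succ)
        (List.range t.length)
        = List.filter (fun t0 => !((x :: t).getD (t0+1) 0 == (x :: t).getD t0 0 + 1))
          (List.range t.length) := by
      apply List.filter_congr; intro k _; exact hpred k
    rw [List.length_cons, List.range_succ_eq_map, List.filter_cons]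
    by_cases h : x = c + 1
    · have h0 : (!((c :: x :: t).getD (0+1) 0 == (c :: x :: t).getD 0 0 + 1)) = false := by
        simp [h]
      simp only [h0]
      rw [if_neg (by simp), List.filter_map, hfc, List.map_map]
      have : (fun k => ((k + (a+1) : Nat) : Int)) ∘ Nat.succ
           = fun k => ((k + ((a+1)+1) : Nat) : Int) := by
        funext k; simp [Nat.succ_eq_add_one]; ring_nf
      rw [this, ih x (a+1)]
      simp [brkI, h]
    · have h0 : (!((c :: x :: t).getD (0+1) 0 == (c :: x :: t).getD 0 0 + 1)) = true := by
        simp [h]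
      simp only [h0]
      rw [if_pos trivial, List.map_cons, List.filter_map, hfc, List.map_map]
      have : (fun k => ((k + (a+1) : Nat) : Int)) ∘ Nat.succ
           = fun k => ((k + ((a+1)+1) : Nat) : Int) := by
        funext k; simp [Nat.succ_eq_add_one]; ring_nf
      rw [this, ih x (a+1)]
      simp [brkI, h]

theorem R1 (m : Nat) : PySem.List.pyRange 1 (((m+1 : Nat)) : Int) 1 = (List.range m).map (fun t => ((t+1 : Nat) : Int)) := by
  induction m with
  | zero => decide
  | succ k ih =>
    have h : ((k+1+1 : Nat) : Int) = ((k+1 : Nat) : Int) + 1 := by push_cast; ring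
    rw [h, PySem.List.pyRange_one_succ_right (by push_cast; omega), ih, List.range_succ]
    simp

theorem range_filter_eq_brkI (c : Int) (l : List Int) :
    (PySem.List.pyRange 1 (((c :: l).length : Nat) : Int) 1).filter
        (fun i => !(PySem.List.pyGetD (c :: l) i 0 == PySem.List.pyGetD (c :: l) (i - 1) 0 + 1)) =
      brkI c l 1 := by
  rw [List.length_cons, R1, List.filter_map]
  have hp : List.filter
      ((fun i => !(PySem.List.pyGetD (c :: l) i 0 == PySem.List.pyGetD (c :: l) (i - 1) 0 + 1))
        ∘ (fun t => ((t+1 : Nat) : Int))) (List.range l.length)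
      = List.filter (fun t => !((c :: l).getD (t+1) 0 == (c :: l).getD t 0 + 1))
        (List.range l.length) := by
    apply List.filter_congr; intro k _
    have h1 : ((k+1 : Nat) : Int) - 1 = ((k : Nat) : Int) := by push_cast; ring
    simp only [Function.comp_def, h1, PySem.List.pyGetD_natCast]
  rw [hp]
  have := N2 l c 0
  simpa using this

def runsF (c k : Int) : List Int → List Int
  | [] => [k]
  | a :: t => if a = c + 1 then runsF a (k + 1) t else k :: runsF a 1 t

def diffs (xs : List Int) : List Int := (xs.zip xs.tail).map (fun p => p.2 - p.1)

theorem runsF_bump (l : List Int) : ∀ (c k : Int),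
    runsF c (k + 1) l = match runsF c k l with
      | h :: t => (h + 1) :: t
      | [] => [] := by
  induction l with
  | nil => intro c k; simp [runsF]
  | cons a t ih =>
    intro c k
    by_cases h : a = c + 1 <;> simp [runsF, h, ih]

theorem diffs_cons_cons (x y : Int) (rest : List Int) :
    diffs (x :: y :: rest) = (y - x) :: diffs (y :: rest) := by
  simp [diffs]

theorem mainG (l : List Int) : ∀ (c : Int) (j : Nat),
    diffs ((j : Int) :: brkI c l ((j : Int) + 1) ++ [(j : Int) + ((l.length + 1 : Nat) : Int)]) =
      runsF c 1 l := by
  induction l with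
  | nil =>
    intro c j
    simp [brkI, runsF, diffs]
  | cons a t ih =>
    intro c j
    have ih' := ih a (j + 1)
    have hoff : ((j+1 : Nat) : Int) = (j : Int) + 1 := by push_cast; ring
    rw [hoff] at ih'
    have hend : (((a :: t).length + 1 : Nat) : Int) = ((t.length + 1 : Nat) : Int) + 1 := by
      push_cast [List.length_cons]; ring
    rw [hend, show ((j:Int)) + ((((t.length+1 : Nat)):Int)+1) = ((j:Int)+1) + (((t.length+1 : Nat)):Int) by ring]
    by_cases h : a = c + 1
    · -- run continues: the first difference grows by one
      simp only [brkI, if_pos h, List.nil_append] at *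
      simp only [runsF, if_pos h]
      rw [runsF_bump, ← ih']
      cases hB : brkI a t ((j : Int) + 1 + 1) with
      | nil =>
          simp only [hB, List.nil_append, List.cons_append] at *
          simp [diffs]; ring
      | cons r R' =>
          simp only [hB, List.cons_append] at *
          rw [diffs_cons_cons, diffs_cons_cons]
          have : r - (j : Int) = (r - ((j : Int) + 1)) + 1 := by ring
          rw [this]
    · -- run breaks at position j+1
      simp only [brkI, if_neg h, List.cons_append, List.nil_append] at *
      rw [diffs_cons_cons, ih']
      simp [runsF, h]

theorem foldlA (l : List Int) : ∀ (c k : Int) (rs : List Int),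
    (let st := l.foldl
        (fun (st : Int × Int × List Int) adapter =>
          if adapter = st.1 + 1 then (adapter, st.2.1 + 1, st.2.2)
          else (adapter, 1, st.2.2 ++ [st.2.1]))
        (c, k, rs)
     st.2.2 ++ [st.2.1]) = rs ++ runsF c k l := by
  induction l with
  | nil => intro c k rs; simp [runsF]
  | cons a t ih =>
    intro c k rs
    by_cases h : a = c + 1 <;> simp [runsF, h, ih]

-- ===== VERDICT (by name: the statement is the Claim_ definition above) =====
theorem get_items_in_runs_spec : Claim_equal_get_items_in_runs := by
  intro adapters _
  unfold Spec_get_items_in_runs get_items_in_runs get_items_in_runs_alt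
  rw [foldlA]
  show ([] : List Int) ++ runsF 0 1 adapters
      = List.map (fun p => p.2 - p.1)
          (([0] ++ List.filter
              (fun i => !(PySem.List.pyGetD (0 :: adapters) i 0
                  == PySem.List.pyGetD (0 :: adapters) (i - 1) 0 + 1))
              (PySem.List.pyRange 1 (((0 :: adapters).length : Nat) : Int) 1) ++
            [(((0 :: adapters).length : Nat) : Int)]).zip
            (PySem.List.slice
              ([0] ++ List.filter
                (fun i => !(PySem.List.pyGetD (0 :: adapters) i 0
                    == PySem.List.pyGetD (0 :: adapters) (i - 1) 0 + 1))
                (PySem.List.pyRange 1 (((0 :: adapters).length : Nat) : Int) 1) ++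
              [(((0 :: adapters).length : Nat) : Int)]) (some 1) none))
  rw [PySem.List.slice_from_one, range_filter_eq_brkI]
  have hm := mainG adapters 0 0
  simp only [Nat.cast_zero, zero_add] at hm
  show ([] : List Int) ++ runsF 0 1 adapters
      = diffs ([0] ++ brkI 0 adapters 1 ++ [(((0 :: adapters).length : Nat) : Int)])
  rw [List.nil_append, ← hm]
  congr 1
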